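-- pv_equiv track=rewrite | github.com/dafrussell/bookbot | main.py | calc_lettercount
-- ===== SOURCE A (Python) =====
-- def calc_lettercount(words):
--         # Put words into lower case
--         all_as_lower = words.lower()
--
--         # Split the lower case text into strings by word
--         all_as_lower_aswords = all_as_lower.split()
--
--         # Save the values of each character into a list
--         all_characters = []
--         list(map(all_characters.extend, all_as_lower_aswords))
--
--         # Calculate each characters occurence from all_characters list
--         dict = {}
--         for char in all_characters:
--             if char in dict:
--                 dict[char] += 1
--             else:
--                  dict[char] = 1
--
--         return dict
-- ===== SOURCE B (Python) =====
-- def calc_lettercount(words):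
--     # Simpler: one pass over the lowercased text, counting non-whitespace chars
--     # directly in a dict (no split, no intermediate character list).
--     d = {}
--     for char in words.lower():
--         if not char.isspace():
--             d[char] = d.get(char, 0) + 1
--     return d
-- ===== Notes on version B (the rewrite author's own statement) =====
-- stated objective: simpler
-- what changed: B drops the split-into-words and the intermediate flattened character list: a single pass over the lowercased text counts each non-whitespace character directly in a dict via d.get(char,0)+1.
import Mathlib
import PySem

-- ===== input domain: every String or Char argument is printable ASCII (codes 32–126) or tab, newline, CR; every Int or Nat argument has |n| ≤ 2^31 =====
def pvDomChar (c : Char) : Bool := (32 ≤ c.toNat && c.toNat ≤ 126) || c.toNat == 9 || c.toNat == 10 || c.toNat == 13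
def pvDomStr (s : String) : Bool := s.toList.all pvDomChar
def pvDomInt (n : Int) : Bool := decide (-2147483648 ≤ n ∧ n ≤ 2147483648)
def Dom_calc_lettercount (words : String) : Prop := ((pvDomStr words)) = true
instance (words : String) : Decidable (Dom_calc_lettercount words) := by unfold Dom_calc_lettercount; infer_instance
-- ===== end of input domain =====

-- B replaces A's split-into-words + flattened character list by a single pass over the
-- lowercased text that counts each non-whitespace character directly (objective: simpler).

-- ===== PORT A =====
def calc_lettercount (words : String) : List (String × Int) :=
  let all_as_lower := PySem.Str.lower words
  let all_as_lower_aswords := PySem.Str.split₀ all_as_lower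
  -- list(map(all_characters.extend, all_as_lower_aswords)): extending a list with a
  -- string appends its characters as 1-character strings
  let all_characters : List String :=
    all_as_lower_aswords.foldl
      (fun acc w => acc ++ w.toList.map (fun c => String.ofList [c])) []
  let d : PySem.Dict String Int :=
    all_characters.foldl
      (fun d ch =>
        if d.contains ch then
          -- dict[char] += 1: the key is present (guarded), so getD's default is unused
          d.insert ch (d.getD ch 0 + 1)
        else
          d.insert ch 1)
      PySem.Dict.empty
  d.items

-- ===== PORT B =====
def calc_lettercount_alt (words : String) : List (String × Int) :=
  let d : PySem.Dict String Int :=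
    (PySem.Str.lower words).toList.foldl
      (fun d c =>
        if PySem.Chars.isspace c then d
        else
          let ch := String.ofList [c]
          d.insert ch (d.getD ch 0 + 1))
      PySem.Dict.empty
  d.items

-- ===== PRECONDITION & SPEC =====
def Spec_calc_lettercount (words : String) (out : List (String × Int)) : Prop := out = calc_lettercount_alt words
instance (words : String) (out : List (String × Int)) : Decidable (Spec_calc_lettercount words out) := by unfold Spec_calc_lettercount; infer_instance

-- ===== CLAIM (what is proved, stated in full; the proofs are below) =====
def Claim_equal_calc_lettercount : Prop := ∀ (words : String), Dom_calc_lettercount words → Spec_calc_lettercount words (calc_lettercount words)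

-- ===== LEMMAS AND PROOFS =====

-- str.split() keeps exactly the non-whitespace characters, in order.
theorem go_flatten (rest cur : List Char) (acc : List (List Char)) :
    (PySem.Chars.split₀.go rest cur acc).flatten
      = acc.reverse.flatten ++ cur.reverse ++ rest.filter (fun c => !PySem.Chars.isspace c) := by
  induction rest generalizing cur acc with
  | nil =>
    by_cases h : cur.isEmpty
    · simp_all [PySem.Chars.split₀.go, List.isEmpty_iff]
    · simp [PySem.Chars.split₀.go, h]
  | cons c rest ih =>
    by_cases hs : PySem.Chars.isspace c
    · by_cases h : cur.isEmpty
      · simp_all [PySem.Chars.split₀.go, List.isEmpty_iff]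
      · simp [PySem.Chars.split₀.go, hs, h, ih]
    · simp [PySem.Chars.split₀.go, hs, ih]

theorem split₀_flatten (cs : List Char) :
    (PySem.Chars.split₀ cs).flatten = cs.filter (fun c => !PySem.Chars.isspace c) := by
  simpa using go_flatten cs [] []

-- A's counting step equals B's unconditional one.
theorem stepA_eq (d : PySem.Dict String Int) (ch : String) :
    (if d.contains ch then d.insert ch (d.getD ch 0 + 1) else d.insert ch 1)
      = d.insert ch (d.getD ch 0 + 1) := by
  by_cases h : d.contains ch
  · simp [h]
  · simp [h, PySem.Dict.getD_of_not_contains _ _ (by simpa using h)]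

-- ===== VERDICT (by name: the statement is the Claim_ definition above) =====

theorem calc_lettercount_spec : Claim_equal_calc_lettercount := by
  intro words _
  unfold Spec_calc_lettercount calc_lettercount calc_lettercount_alt
  simp only [PySem.List.foldl_append_eq_flatMap]
  have hB :
      (PySem.Str.lower words).toList.foldl
        (fun d c =>
          if PySem.Chars.isspace c then d
          else d.insert (String.ofList [c]) (d.getD (String.ofList [c]) 0 + 1))
        (PySem.Dict.empty : PySem.Dict String Int)
      = ((PySem.Str.lower words).toList.filter (fun c => !PySem.Chars.isspace c)).foldl
          (fun d c => d.insert (String.ofList [c]) (d.getD (String.ofList [c]) 0 + 1))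
          (PySem.Dict.empty : PySem.Dict String Int) := by
    rw [List.foldl_filter]
    exact PySem.List.foldl_congr_mem _ _ _ _
      (fun d c _ => by by_cases h : PySem.Chars.isspace c <;> simp [h])
  have hA :
      ((PySem.Str.split₀ (PySem.Str.lower words)).flatMap
          (fun w => w.toList.map fun c => String.ofList [c])).foldl
        (fun d ch => if d.contains ch then d.insert ch (d.getD ch 0 + 1) else d.insert ch 1)
        (PySem.Dict.empty : PySem.Dict String Int)
      = ((PySem.Str.lower words).toList.filter (fun c => !PySem.Chars.isspace c)).foldl
          (fun d c => d.insert (String.ofList [c]) (d.getD (String.ofList [c]) 0 + 1))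
          (PySem.Dict.empty : PySem.Dict String Int) := by
    have hchars :
        (PySem.Str.split₀ (PySem.Str.lower words)).flatMap
            (fun w => w.toList.map fun c => String.ofList [c])
          = ((PySem.Str.lower words).toList.filter
              (fun c => !PySem.Chars.isspace c)).map (fun c => String.ofList [c]) := by
      rw [← split₀_flatten, ← PySem.Str.split₀_map_toList, List.flatMap_def,
        List.map_flatten, List.map_map]
      rfl
    rw [hchars, List.foldl_map]
    exact PySem.List.foldl_congr_mem _ _ _ _ (fun d c _ => stepA_eq d _)
  rw [List.nil_append, hA, hB]
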